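-- pv_equiv track=rewrite | github.com/Joshua992700/ESEC-Portal | count_ascending_triples.py | count_ascending_triples
-- ===== SOURCE A (Python) =====
-- def count_ascending_triples(arr):
--     count = 0
--     arr.sort()
--     for i in range(len(arr) - 2):
--         for j in range(i + 1, len(arr) - 1):
--             for k in range(j + 1, len(arr)):
--                 if arr[i] < arr[j] < arr[k]:
--                     count += 1
--     return count
-- ===== SOURCE B (Python) =====
-- def count_ascending_triples(arr):
--     # Per-middle-element counting: sort (in place, like A), then for each
--     # element x add (#elements < x) * (#elements > x).  O(n^2) vs A's O(n^3).
--     arr.sort()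
--     total = 0
--     for x in arr:
--         below = 0
--         above = 0
--         for y in arr:
--             if y < x:
--                 below += 1
--             elif x < y:
--                 above += 1
--         total += below * above
--     return total
-- ===== Notes on version B (the rewrite author's own statement) =====
-- stated objective: faster
-- what changed: Replaces the triple nested loop over index triples by per-middle-element counting: for each element x the answer gains (#elements < x) * (#elements > x), removing one nesting level.
import Mathlib
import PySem

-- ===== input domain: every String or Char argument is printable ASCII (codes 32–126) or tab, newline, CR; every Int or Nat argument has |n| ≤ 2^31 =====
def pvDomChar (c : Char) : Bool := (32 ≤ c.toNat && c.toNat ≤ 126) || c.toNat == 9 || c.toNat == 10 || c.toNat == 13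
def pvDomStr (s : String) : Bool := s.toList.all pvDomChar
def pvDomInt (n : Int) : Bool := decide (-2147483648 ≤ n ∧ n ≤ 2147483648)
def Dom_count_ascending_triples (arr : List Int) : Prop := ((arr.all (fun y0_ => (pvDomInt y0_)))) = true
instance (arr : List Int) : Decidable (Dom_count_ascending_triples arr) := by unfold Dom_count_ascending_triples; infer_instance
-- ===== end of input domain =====

-- B replaces A's triple nested index loop by per-middle-element counting ((#smaller)·(#larger) per element),
-- one nesting level fewer; both sort arr in place (same side effect), the equivalence proved is about the return value.

-- ===== PORT A =====
def count_ascending_triples (arr : List Int) : Int :=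
  let s := PySem.List.sorted arr (fun x => x)
  let n : Int := (s.length : Int)
  (PySem.List.pyRange 0 (n - 2)).foldl (fun count i =>
    (PySem.List.pyRange (i + 1) (n - 1)).foldl (fun count j =>
      (PySem.List.pyRange (j + 1) n).foldl (fun count k =>
        if PySem.List.pyGetD s i 0 < PySem.List.pyGetD s j 0 ∧
           PySem.List.pyGetD s j 0 < PySem.List.pyGetD s k 0
        then count + 1 else count) count) count) 0

-- ===== PORT B =====
def count_ascending_triples_alt (arr : List Int) : Int :=
  let s := PySem.List.sorted arr (fun x => x)
  s.foldl (fun total x =>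
    let ba := s.foldl (fun (ba : Int × Int) y =>
      if y < x then (ba.1 + 1, ba.2)
      else if x < y then (ba.1, ba.2 + 1)
      else ba) (0, 0)
    total + ba.1 * ba.2) 0

-- ===== PRECONDITION & SPEC =====
def Spec_count_ascending_triples (arr : List Int) (out : Int) : Prop := out = count_ascending_triples_alt arr
instance (arr : List Int) (out : Int) : Decidable (Spec_count_ascending_triples arr out) := by unfold Spec_count_ascending_triples; infer_instance

-- ===== CLAIM (what is proved, stated in full; the proofs are below) =====
def Claim_equal_count_ascending_triples : Prop := ∀ (arr : List Int), Dom_count_ascending_triples arr → Spec_count_ascending_triples arr (count_ascending_triples arr)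

-- ===== LEMMAS AND PROOFS =====

-- number of elements of s strictly below / above v
def cntLT (s : List Int) (v : Int) : Int := (s.countP (fun z => decide (z < v)) : Int)
def cntGT (s : List Int) (v : Int) : Int := (s.countP (fun z => decide (v < z)) : Int)
-- the common value both sides are reduced to
def Sval (s : List Int) : Int := (s.map (fun x => cntLT s x * cntGT s x)).sum

-- reading a list off by index equals the list itself
theorem mgr {α β : Type} (d : α) (q : α → β) :
    ∀ (t : List α), (List.range t.length).map (fun k => q (t.getD k d)) = t.map q := by
  intro t
  induction t with
  | nil => simp
  | cons x t ih =>
    simp [List.range_succ_eq_map, List.map_map, Function.comp_def]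
    exact ih

-- B's inner pair loop computes the two counts
theorem pairfold (x : Int) :
    ∀ (l : List Int) (b a : Int),
      List.foldl (fun (ba : Int × Int) y =>
        if y < x then (ba.1 + 1, ba.2) else if x < y then (ba.1, ba.2 + 1) else ba) (b, a) l
      = (b + (l.countP (fun y => decide (y < x)) : Int),
         a + (l.countP (fun y => decide (x < y)) : Int)) := by
  intro l
  induction l with
  | nil => intro b a; simp
  | cons y l ih =>
    intro b a
    by_cases h1 : y < x
    · have h2 : ¬ x < y := by omega
      simp [h1, h2, ih]; ring
    · by_cases h2 : x < y
      · simp [h1, h2, ih]; ring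
      · simp [h1, h2, ih]

-- B's outer loop
theorem altEq (s : List Int) :
    s.foldl (fun total x =>
      let ba := s.foldl (fun (ba : Int × Int) y =>
        if y < x then (ba.1 + 1, ba.2) else if x < y then (ba.1, ba.2 + 1) else ba) (0, 0)
      total + ba.1 * ba.2) 0 = Sval s := by
  simp only [pairfold, zero_add]
  rw [PySem.List.foldl_add s
      (fun x => ((s.countP (fun y => decide (y < x)) : Int)) * ((s.countP (fun y => decide (x < y)) : Int))) 0]
  simp [Sval, cntLT, cntGT]

-- sorted: elements past index k are all ≥ s[k], so the > count can start anywhere ≤ k+1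
theorem count_gt_drop (s : List Int) (hs : List.Pairwise (· ≤ ·) s) (k : Nat) (hk : k < s.length) :
    ((s.drop (k+1)).countP (fun y => decide (s.getD k 0 < y)))
      = s.countP (fun y => decide (s.getD k 0 < y)) := by
  set v := s.getD k 0 with hv
  conv_rhs => rw [← List.take_append_drop (k+1) s]
  rw [List.countP_append]
  have hz : (s.take (k+1)).countP (fun y => decide (v < y)) = 0 := by
    rw [List.countP_eq_zero]
    intro y hy
    simp only [decide_eq_true_eq, not_lt]
    obtain ⟨i, hi, hival⟩ := List.getElem_of_mem hy
    obtain ⟨hik, hilen⟩ : i ≤ k ∧ i < s.length := by simpa using hi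
    rw [← hival, List.getElem_take, hv, List.getD_eq_getElem s 0 hk]
    rcases Nat.lt_or_ge i k with h | h
    · exact (List.pairwise_iff_getElem.mp hs) i k hilen hk h
    · have : i = k := by omega
      subst this; exact le_refl _
  omega

theorem count_lt_take (s : List Int) (hs : List.Pairwise (· ≤ ·) s) (k : Nat) (hk : k < s.length) :
    ((s.take k).countP (fun z => decide (z < s.getD k 0)))
      = s.countP (fun z => decide (z < s.getD k 0)) := by
  set v := s.getD k 0 with hv
  conv_rhs => rw [← List.take_append_drop k s]
  rw [List.countP_append]
  have hz : (s.drop k).countP (fun z => decide (z < v)) = 0 := by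
    rw [List.countP_eq_zero]
    intro z hz
    simp only [decide_eq_true_eq, not_lt]
    obtain ⟨i, hi, hival⟩ := List.getElem_of_mem hz
    have hki : k + i < s.length := by simp [List.length_drop] at hi; omega
    rw [← hival, List.getElem_drop, hv, List.getD_eq_getElem s 0 hk]
    rcases Nat.eq_zero_or_pos i with h | h
    · subst h; simp
    · exact (List.pairwise_iff_getElem.mp hs) k (k+i) hk hki (by omega)
  omega

theorem count_gt_last (s : List Int) (hs : List.Pairwise (· ≤ ·) s) (h0 : s ≠ []) :
    cntGT s (s.getD (s.length - 1) 0) = 0 := by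
  have hlen : 0 < s.length := List.length_pos_iff.mpr h0
  have h := count_gt_drop s hs (s.length - 1) (by omega)
  have hnil : s.drop (s.length - 1 + 1) = [] := by
    apply List.drop_eq_nil_of_le; omega
  rw [hnil] at h
  simp only [List.countP_nil] at h
  unfold cntGT
  omega

theorem mem_drop_last (s : List Int) (k : Nat) (hk : s.length ≤ k + 1) (y : Int)
    (hy : y ∈ s.drop k) : y = s.getD (s.length - 1) 0 := by
  obtain ⟨i, hi, hival⟩ := List.getElem_of_mem hy
  have hki : k + i < s.length := by simp [List.length_drop] at hi; omega
  have : k + i = s.length - 1 := by omega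
  rw [← hival, List.getElem_drop, List.getD_eq_getElem s 0 (by omega : s.length - 1 < s.length)]
  congr 1

-- pure triangular exchange: summing "pairs after me that beat me" by the left index
-- equals summing "pairs before me that I beat" by the right index
theorem tri (f : Int → Int) :
    ∀ (s : List Int),
      ((List.range s.length).map (fun i =>
          ((s.drop (i+1)).map (fun y => if s.getD i 0 < y then f y else 0)).sum)).sum
      = ((List.range s.length).map (fun k =>
          ((s.take k).countP (fun z => decide (z < s.getD k 0)) : Int) * f (s.getD k 0))).sum := by
  intro s
  induction s with
  | nil => simp
  | cons x t ih =>
    simp only [List.length_cons, List.range_succ_eq_map, List.map_cons, List.sum_cons,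
      List.map_map, Function.comp_def, Nat.succ_eq_add_one, List.drop_succ_cons,
      List.getD_cons_zero, List.getD_cons_succ, List.take_succ_cons, List.take_zero,
      List.countP_nil, List.countP_cons, Nat.cast_zero, zero_mul, zero_add]
    rw [ih]
    have hsplit : ∀ k ∈ List.range t.length,
        ((List.countP (fun z => decide (z < t.getD k 0)) (List.take k t) +
            if decide (x < t.getD k 0) = true then 1 else 0 : Nat) : Int) * f (t.getD k 0)
        = ((List.take k t).countP (fun z => decide (z < t.getD k 0)) : Int) * f (t.getD k 0)
          + (if x < t.getD k 0 then f (t.getD k 0) else 0) := by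
      intro k _
      by_cases hx : x < t.getD k 0
      · rw [if_pos (show decide (x < t.getD k 0) = true by simpa using hx), if_pos hx]
        push_cast; ring
      · rw [if_neg (show ¬ decide (x < t.getD k 0) = true by simpa using hx), if_neg hx]
        push_cast; ring
    rw [List.map_congr_left hsplit, PySem.List.sum_map_add_int]
    rw [mgr 0 (fun v => if x < v then f v else 0) t]
    simp only [List.drop_zero]
    ring

-- A's innermost loop
theorem innerFold (s : List Int) (v w c : Int) {j : Int} (hj : 0 ≤ j) :
    (PySem.List.pyRange (j + 1) (s.length : Int)).foldl
      (fun count k => if v < w ∧ w < PySem.List.pyGetD s k 0 then count + 1 else count) c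
    = c + if v < w then ((s.drop (j+1).toNat).countP (fun y => decide (w < y)) : Int) else 0 := by
  rw [PySem.List.foldl_pyRange_pyGetD' s 0
      (fun count y => if v < w ∧ w < y then count + 1 else count) c (by omega : (0:Int) ≤ j + 1)]
  rw [PySem.List.foldl_ite_add_one (fun y => v < w ∧ w < y)]
  by_cases hvw : v < w
  · simp [hvw]
  · simp [hvw]

-- A's middle loop, on a sorted list
theorem midFold (s : List Int) (hs : List.Pairwise (· ≤ ·) s) (v : Int) {i : Int} (hi : 0 ≤ i) (c : Int) :
    (PySem.List.pyRange (i + 1) ((s.length : Int) - 1)).foldl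
      (fun count j => (PySem.List.pyRange (j + 1) (s.length : Int)).foldl
        (fun count k => if v < PySem.List.pyGetD s j 0 ∧
            PySem.List.pyGetD s j 0 < PySem.List.pyGetD s k 0 then count + 1 else count) count) c
    = c + ((s.drop (i+1).toNat).map (fun y => if v < y then cntGT s y else 0)).sum := by
  have hcong : ∀ (acc : Int), ∀ j ∈ PySem.List.pyRange (i + 1) ((s.length : Int) - 1),
      (PySem.List.pyRange (j + 1) (s.length : Int)).foldl
        (fun count k => if v < PySem.List.pyGetD s j 0 ∧
            PySem.List.pyGetD s j 0 < PySem.List.pyGetD s k 0 then count + 1 else count) acc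
      = acc + (if v < PySem.List.pyGetD s j 0
               then cntGT s (PySem.List.pyGetD s j 0) else 0) := by
    intro acc j hj
    obtain ⟨hj1, hj2⟩ := PySem.List.mem_pyRange_one.mp hj
    have hj0 : (0:Int) ≤ j := by omega
    rw [innerFold s v (PySem.List.pyGetD s j 0) acc hj0]
    have hjk : j.toNat < s.length := by omega
    have h1 : (j+1).toNat = j.toNat + 1 := by omega
    rw [PySem.List.pyGetD_of_nonneg s 0 hj0, h1, count_gt_drop s hs j.toNat hjk]
    rfl
  rw [PySem.List.foldl_congr_mem _ _ _ c hcong]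
  rw [PySem.List.foldl_add]
  congr 1
  have hdrop : (s.drop (i+1).toNat).map (fun y => if v < y then cntGT s y else 0)
      = (PySem.List.pyRange (i+1) (s.length : Int)).map
          (fun j => if v < PySem.List.pyGetD s j 0
                    then cntGT s (PySem.List.pyGetD s j 0) else 0) := by
    rw [← PySem.List.map_pyGetD_pyRange' s 0 (by omega : (0:Int) ≤ i+1), List.map_map]
    rfl
  rw [hdrop]
  by_cases hN : i + 1 ≤ (s.length : Int) - 1
  · have hsplit : (s.length : Int) = ((s.length : Int) - 1) + 1 := by ring
    conv_rhs => rw [hsplit]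
    rw [PySem.List.pyRange_one_succ_right hN, List.map_append, List.sum_append]
    have hne : s ≠ [] := by
      intro h; subst h; simp at hN; omega
    have hget : PySem.List.pyGetD s ((s.length : Int) - 1) 0 = s.getD (s.length - 1) 0 := by
      rw [PySem.List.pyGetD_of_nonneg s 0 (by have := List.length_pos_iff.mpr hne; omega)]
      congr 1
      omega
    have hlast : (if v < PySem.List.pyGetD s ((s.length : Int) - 1) 0
                  then cntGT s (PySem.List.pyGetD s ((s.length : Int) - 1) 0) else 0) = 0 := by
      rw [hget, count_gt_last s hs hne, ite_self]
    simp [hlast]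
  · rw [PySem.List.pyRange_one_eq_nil (by omega : (s.length : Int) - 1 ≤ i + 1),
        PySem.List.pyRange_one_eq_nil (by omega : (s.length : Int) ≤ i + 1)]

-- A's outer loop, on a sorted list
theorem countA_eq (s : List Int) (hs : List.Pairwise (· ≤ ·) s) :
    (PySem.List.pyRange 0 ((s.length : Int) - 2)).foldl (fun count i =>
      (PySem.List.pyRange (i + 1) ((s.length : Int) - 1)).foldl (fun count j =>
        (PySem.List.pyRange (j + 1) (s.length : Int)).foldl (fun count k =>
          if PySem.List.pyGetD s i 0 < PySem.List.pyGetD s j 0 ∧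
             PySem.List.pyGetD s j 0 < PySem.List.pyGetD s k 0
          then count + 1 else count) count) count) 0 = Sval s := by
  have hcong : ∀ (acc : Int), ∀ i ∈ PySem.List.pyRange 0 ((s.length : Int) - 2),
      (PySem.List.pyRange (i + 1) ((s.length : Int) - 1)).foldl (fun count j =>
        (PySem.List.pyRange (j + 1) (s.length : Int)).foldl (fun count k =>
          if PySem.List.pyGetD s i 0 < PySem.List.pyGetD s j 0 ∧
             PySem.List.pyGetD s j 0 < PySem.List.pyGetD s k 0
          then count + 1 else count) count) acc
      = acc + ((s.drop (i+1).toNat).map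
          (fun y => if PySem.List.pyGetD s i 0 < y then cntGT s y else 0)).sum := by
    intro acc i hi
    obtain ⟨hi0, _⟩ := PySem.List.mem_pyRange_one.mp hi
    exact midFold s hs (PySem.List.pyGetD s i 0) hi0 acc
  rw [PySem.List.foldl_congr_mem _ _ _ 0 hcong]
  rw [PySem.List.foldl_add, zero_add]
  have Fzero : ∀ x : Int, 0 ≤ x → (s.length : Int) - 2 ≤ x →
      ((s.drop (x+1).toNat).map
        (fun y => if PySem.List.pyGetD s x 0 < y then cntGT s y else 0)).sum = 0 := by
    intro x hx0 hx2
    apply List.sum_eq_zero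
    intro z hz
    obtain ⟨y, hy, rfl⟩ := List.mem_map.mp hz
    have hne : s ≠ [] := by
      intro h; subst h; simp at hy
    have hym : y = s.getD (s.length - 1) 0 := mem_drop_last s (x+1).toNat (by omega) y hy
    rw [hym, count_gt_last s hs hne, ite_self]
  have hext : ((PySem.List.pyRange 0 ((s.length : Int) - 2)).map (fun i =>
        ((s.drop (i+1).toNat).map
          (fun y => if PySem.List.pyGetD s i 0 < y then cntGT s y else 0)).sum)).sum
      = ((PySem.List.pyRange 0 (s.length : Int)).map (fun i =>
        ((s.drop (i+1).toNat).map
          (fun y => if PySem.List.pyGetD s i 0 < y then cntGT s y else 0)).sum)).sum := by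
    by_cases h2 : 2 ≤ (s.length : Int)
    · rw [PySem.List.pyRange_one_append 0 ((s.length : Int) - 2) (s.length : Int)
            (by omega) (by omega), List.map_append, List.sum_append]
      have hz : ((PySem.List.pyRange ((s.length : Int) - 2) (s.length : Int)).map (fun i =>
          ((s.drop (i+1).toNat).map
            (fun y => if PySem.List.pyGetD s i 0 < y then cntGT s y else 0)).sum)).sum = 0 := by
        apply List.sum_eq_zero
        intro z hz
        obtain ⟨x, hx, rfl⟩ := List.mem_map.mp hz
        obtain ⟨hxa, hxb⟩ := PySem.List.mem_pyRange_one.mp hx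
        exact Fzero x (by omega) (by omega)
      rw [hz, add_zero]
    · rw [PySem.List.pyRange_one_eq_nil (by omega : (s.length : Int) - 2 ≤ 0)]
      symm
      apply List.sum_eq_zero
      intro z hz
      obtain ⟨x, hx, rfl⟩ := List.mem_map.mp hz
      obtain ⟨hxa, hxb⟩ := PySem.List.mem_pyRange_one.mp hx
      simp at *
      exact Fzero x (by omega) (by omega)
  rw [hext]
  rw [PySem.List.pyRange_one 0 (s.length : Int)]
  simp only [zero_add, sub_zero, Int.toNat_natCast, List.map_map, Function.comp_def]
  have hcast : ∀ k ∈ List.range s.length,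
      ((s.drop (((k : Int)) + 1).toNat).map
        (fun y => if PySem.List.pyGetD s (k : Int) 0 < y then cntGT s y else 0)).sum
      = ((s.drop (k+1)).map (fun y => if s.getD k 0 < y then cntGT s y else 0)).sum := by
    intro k _
    have h1 : ((k : Int) + 1).toNat = k + 1 := by omega
    rw [h1, PySem.List.pyGetD_of_nonneg s 0 (by omega), Int.toNat_natCast]
  rw [List.map_congr_left hcast]
  rw [tri (cntGT s) s]
  have hck : ∀ k ∈ List.range s.length,
      ((s.take k).countP (fun z => decide (z < s.getD k 0)) : Int) * cntGT s (s.getD k 0)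
      = cntLT s (s.getD k 0) * cntGT s (s.getD k 0) := by
    intro k hk
    rw [count_lt_take s hs k (List.mem_range.mp hk)]
    rfl
  rw [List.map_congr_left hck]
  rw [mgr 0 (fun v => cntLT s v * cntGT s v) s]
  rfl

-- ===== VERDICT (by name: the statement is the Claim_ definition above) =====
theorem count_ascending_triples_spec : Claim_equal_count_ascending_triples := by
  intro arr _
  unfold Spec_count_ascending_triples count_ascending_triples count_ascending_triples_alt
  have hs : List.Pairwise (· ≤ ·) (PySem.List.sorted arr (fun x => x)) :=
    PySem.List.sorted_pairwise arr (fun x => x)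
  simp only []
  rw [countA_eq _ hs, altEq]
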